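-- pv_equiv track=rewrite | github.com/bplumber/LeetCode | Day11/NumberofLinesToWriteString.py | numberOfLines
-- ===== SOURCE A (Python) =====
-- from typing import List
--
-- def numberOfLines(widths: List[int], s: str) -> List[int]:
--     no_of_lines = 0
--     last_line = 0
--     temp = 0
--     for i in s:
--         temp+=widths[ord(i)-97]
--         if temp>100:
--             no_of_lines+=1
--             temp=0
--             temp+=widths[ord(i)-97]
--     if temp!=0:
--         no_of_lines+=1
--         last_line = temp
--     return [no_of_lines, last_line]
-- ===== SOURCE B (Python) =====
-- from typing import List
--
-- def numberOfLines(widths: List[int], s: str) -> List[int]: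
--     # Staged: build a prefix-sum array once, then scan for break positions
--     # comparing prefix differences against a moving base index.
--     ws = [widths[ord(c) - 97] for c in s]
--     prefix = [0]
--     for w in ws:
--         prefix.append(prefix[-1] + w)
--     lines, base = 0, 0
--     for m, _ in enumerate(ws):
--         if prefix[m + 1] - prefix[base] > 100:
--             lines, base = lines + 1, m
--     last = prefix[len(ws)] - prefix[base]
--     return [lines + 1, last] if last != 0 else [lines, 0]
-- ===== Notes on version B (the rewrite author's own statement) =====
-- stated objective: alternative
-- what changed: B is staged: it materialises the width list and a prefix-sum array, then finds line breaks by comparing prefix differences against a moving base index, instead of A's single running accumulator that is reset and re-added on overflow; the last line is read off as a prefix difference.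
import Mathlib
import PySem

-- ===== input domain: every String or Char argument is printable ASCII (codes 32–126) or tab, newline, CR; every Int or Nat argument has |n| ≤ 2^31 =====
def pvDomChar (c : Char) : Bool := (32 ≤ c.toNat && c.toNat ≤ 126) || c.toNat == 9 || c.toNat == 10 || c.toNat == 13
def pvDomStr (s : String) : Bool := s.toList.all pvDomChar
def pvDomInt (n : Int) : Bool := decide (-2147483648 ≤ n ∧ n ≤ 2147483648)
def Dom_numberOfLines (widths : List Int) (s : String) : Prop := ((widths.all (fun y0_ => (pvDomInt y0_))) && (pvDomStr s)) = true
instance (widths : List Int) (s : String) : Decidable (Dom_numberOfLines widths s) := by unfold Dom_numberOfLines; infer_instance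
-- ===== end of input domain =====

-- B replaces A's running accumulator (reset-and-readd on overflow) by staged passes: a
-- materialised width list, a pfxArr-sum array, and a break-position scan against a moving
-- base index; objective: alternative (same asymptotic cost).


-- ===== PORT A =====
def numberOfLines (widths : List Int) (s : String) : List Int :=
  -- state = (no_of_lines, temp); last_line stays 0 until after the loop, exactly as in A
  let st := s.toList.foldl (fun (st : Int × Int) i =>
    let temp := st.2 + PySem.List.pyGetD widths ((i.toNat : Int) - 97) 0
    if temp > 100 then
      (st.1 + 1, 0 + PySem.List.pyGetD widths ((i.toNat : Int) - 97) 0)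
    else (st.1, temp)) (0, 0)
  if st.2 ≠ 0 then [st.1 + 1, st.2] else [st.1, 0]

-- ===== PORT B =====
def numberOfLines_alt (widths : List Int) (s : String) : List Int :=
  let ws := s.toList.map (fun c => PySem.List.pyGetD widths ((c.toNat : Int) - 97) 0)
  let pfxArr := ws.foldl (fun (P : List Int) w => P ++ [PySem.List.pyGetD P (-1) 0 + w]) [0]
  let st := (PySem.List.enumerate ws 0).foldl (fun (st : Int × Int) p =>
    if PySem.List.pyGetD pfxArr (p.1 + 1) 0 - PySem.List.pyGetD pfxArr st.2 0 > 100
    then (st.1 + 1, p.1) else st) ((0 : Int), (0 : Int))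
  let last := PySem.List.pyGetD pfxArr (ws.length : Int) 0 - PySem.List.pyGetD pfxArr st.2 0
  if last ≠ 0 then [st.1 + 1, last] else [st.1, 0]

-- ===== PRECONDITION & SPEC =====
-- Pre_ excludes exactly the inputs on which A raises IndexError: some character's
-- Python index ord(c)-97 is out of range for widths.
def Pre_numberOfLines (widths : List Int) (s : String) : Prop :=
  (s.toList.all (fun c => decide (PySem.Raise.InRange widths.length ((c.toNat : Int) - 97)))) = true
instance (widths : List Int) (s : String) : Decidable (Pre_numberOfLines widths s) := by
  unfold Pre_numberOfLines; infer_instance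
def pvWitness_numberOfLines : List Int × String := ([10, 20, 30], "abc")

def Spec_numberOfLines (widths : List Int) (s : String) (out : List Int) : Prop := out = numberOfLines_alt widths s
instance (widths : List Int) (s : String) (out : List Int) : Decidable (Spec_numberOfLines widths s out) := by unfold Spec_numberOfLines; infer_instance

-- ===== CLAIM (what is proved, stated in full; the proofs are below) =====
def Claim_equal_numberOfLines : Prop := ∀ (widths : List Int) (s : String), Dom_numberOfLines widths s → Pre_numberOfLines widths s → Spec_numberOfLines widths s (numberOfLines widths s)

-- ===== LEMMAS AND PROOFS =====

-- A's loop step, on the width of the current character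
def pvStepA (st : Int × Int) (w : Int) : Int × Int :=
  if st.2 + w > 100 then (st.1 + 1, w) else (st.1, st.2 + w)

-- the tail of the pfxArr-sum array built from running total t
def pvGo (t : Int) : List Int → List Int
  | [] => []
  | w :: ws => (t + w) :: pvGo (t + w) ws

-- building the pfxArr array by append-with-last equals pvGo
theorem pvBuild (ws : List Int) : ∀ (acc : List Int) (t : Int),
    PySem.List.pyGetD acc (-1) 0 = t → acc ≠ [] →
    ws.foldl (fun (P : List Int) w => P ++ [PySem.List.pyGetD P (-1) 0 + w]) acc
      = acc ++ pvGo t ws := by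
  induction ws with
  | nil => intro acc t _ _; simp [pvGo]
  | cons w ws ih =>
    intro acc t ht hne
    simp only [List.foldl_cons, pvGo]
    rw [ht, ih (acc ++ [t + w]) (t + w)
        (PySem.List.pyGetD_neg_one_append_singleton acc (t + w) 0) (by simp)]
    simp

-- reading the pfxArr array at a nonnegative in-range index gives a partial sum
theorem pvPfxGet : ∀ (ws : List Int) (t : Int) (k : Nat), k ≤ ws.length →
    PySem.List.pyGetD (t :: pvGo t ws) ((k : Nat) : Int) 0 = t + (ws.take k).sum := by
  intro ws
  induction ws with
  | nil =>
    intro t k hk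
    have hk0 : k = 0 := Nat.le_zero.mp hk
    subst hk0
    simp [pvGo]
  | cons w ws ih =>
    intro t k hk
    cases k with
    | zero => simp [pvGo]
    | succ k =>
      have := ih (t + w) k (by simpa using hk)
      simp only [PySem.List.pyGetD_natCast, pvGo] at this ⊢
      simp only [List.getD, List.getElem?_cons_succ] at this ⊢
      rw [this]
      simp only [List.take_succ_cons, List.sum_cons]
      ring

-- the break-position scan agrees with A's accumulator loop
theorem pvLoop (ws : List Int) (P : List Int)
    (hP : ∀ k : Nat, k ≤ ws.length →
      PySem.List.pyGetD P ((k : Nat) : Int) 0 = (ws.take k).sum) :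
    ∀ (rs : List Int) (m : Nat) (l : Int) (base : Nat) (t : Int),
    rs = ws.drop m → base ≤ m → m ≤ ws.length →
    t = (ws.take m).sum - (ws.take base).sum →
    ∃ b : Nat, b ≤ ws.length ∧
      (PySem.List.enumerate rs (m : Int)).foldl (fun (st : Int × Int) p =>
        if PySem.List.pyGetD P (p.1 + 1) 0 - PySem.List.pyGetD P st.2 0 > 100
        then (st.1 + 1, p.1) else st) (l, (base : Int))
        = ((rs.foldl pvStepA (l, t)).1, (b : Int)) ∧
      (rs.foldl pvStepA (l, t)).2 = (ws.take ws.length).sum - (ws.take b).sum := by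
  intro rs
  induction rs with
  | nil =>
    intro m l base t hrs hbm hm ht
    have hmn : m = ws.length := by
      have := congrArg List.length hrs
      simp at this; omega
    exact ⟨base, by omega, by simp [PySem.List.enumerate], by simp [ht, hmn]⟩
  | cons w rs ih =>
    intro m l base t hrs hbm hm ht
    have hmlt : m < ws.length := by
      by_contra h
      rw [List.drop_eq_nil_of_le (by omega)] at hrs
      exact (List.cons_ne_nil _ _) hrs
    have hdrop : ws.drop m = ws[m] :: ws.drop (m + 1) := List.drop_eq_getElem_cons hmlt
    rw [hdrop] at hrs
    obtain ⟨hw, hrs'⟩ : w = ws[m] ∧ rs = ws.drop (m + 1) := by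
      exact ⟨(List.cons.injEq _ _ _ _).mp hrs.symm |>.1.symm,
             ((List.cons.injEq _ _ _ _).mp hrs.symm).2.symm⟩
    subst hw hrs'
    have hsucc : (ws.take (m + 1)).sum = (ws.take m).sum + ws[m] :=
      List.sum_take_succ ws m hmlt
    have hPm1 : PySem.List.pyGetD P ((m : Int) + 1) 0 = (ws.take (m + 1)).sum := by
      have := hP (m + 1) (by omega)
      push_cast at this ⊢; exact this
    have hPb : PySem.List.pyGetD P ((base : Int)) 0 = (ws.take base).sum :=
      hP base (by omega)
    rw [PySem.List.enumerate_cons]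
    simp only [List.foldl_cons, pvStepA, hPm1, hPb]
    have hcond : (ws.take (m + 1)).sum - (ws.take base).sum = t + ws[m] := by
      rw [hsucc, ht]; ring
    rw [hcond]
    by_cases h : t + ws[m] > 100
    · simp only [if_pos h]
      have := ih (m + 1) (l + 1) m (ws[m]) rfl (by omega) (by omega)
        (by rw [hsucc]; ring)
      simpa using this
    · simp only [if_neg h]
      have := ih (m + 1) l base (t + ws[m]) rfl (by omega) (by omega)
        (by rw [hsucc, ht]; ring)
      simpa using this

-- ===== VERDICT (by name: the statement is the Claim_ definition above) =====
theorem numberOfLines_spec : Claim_equal_numberOfLines := by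
  intro widths s _ _
  unfold Spec_numberOfLines numberOfLines numberOfLines_alt
  dsimp only
  set ws := s.toList.map (fun c => PySem.List.pyGetD widths ((c.toNat : Int) - 97) 0) with hws
  -- A's fold over characters = fold of pvStepA over ws
  have hA : s.toList.foldl (fun (st : Int × Int) i =>
      let temp := st.2 + PySem.List.pyGetD widths ((i.toNat : Int) - 97) 0
      if temp > 100 then
        (st.1 + 1, 0 + PySem.List.pyGetD widths ((i.toNat : Int) - 97) 0)
      else (st.1, temp)) (0, 0) = ws.foldl pvStepA (0, 0) := by
    rw [hws, List.foldl_map]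
    congr 1
    funext st w
    simp [pvStepA]
  rw [hA]
  -- the pfxArr array
  have hbuild : ws.foldl (fun (P : List Int) w => P ++ [PySem.List.pyGetD P (-1) 0 + w]) [0]
      = 0 :: pvGo 0 ws := by
    rw [pvBuild ws [0] 0 (by decide) (by simp)]
    rfl
  rw [hbuild]
  have hP : ∀ k : Nat, k ≤ ws.length →
      PySem.List.pyGetD (0 :: pvGo 0 ws) ((k : Nat) : Int) 0 = (ws.take k).sum := by
    intro k hk
    rw [pvPfxGet ws 0 k hk]
    exact zero_add _
  obtain ⟨b, hb, heq, hlast⟩ :=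
    pvLoop ws (0 :: pvGo 0 ws) hP ws 0 0 0 0 (by simp) (by omega) (by omega) (by simp)
  push_cast at heq
  rw [heq, hP ws.length (by omega), hP b hb]
  rw [← hlast]
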